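-- pv_equiv track=rewrite | github.com/seokhyu-n/cvrp-road-demo | cvrp/data.py | split_trips
-- ===== SOURCE A (Python) =====
-- def split_trips(path_1d):
--     """
--     path_1d: list[int], e.g. [0,4,2,0,1,3,0]
--     return: list[list[int]] trips excluding consecutive zeros
--     """
--     trips = []
--     cur = []
--     for i, v in enumerate(path_1d):
--         if i == 0:
--             cur = [v]
--             continue
--         cur.append(v)
--         if v == 0 and len(cur) > 1:
--             # end of a trip
--             if not (len(cur) == 2 and cur[0] == 0 and cur[1] == 0):
--                 trips.append(cur)
--             cur = [0]
--     # 마지막이 depot으로 끝나지 않는 경우 (안전)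
--     if len(cur) > 1 and cur[-1] != 0:
--         cur.append(0)
--         trips.append(cur)
--     return trips
-- ===== SOURCE B (Python) =====
-- def split_trips(path_1d):
--     if not path_1d:
--         return []
--     zero_idx = [i for i in range(1, len(path_1d)) if path_1d[i] == 0]
--     trips = []
--     start = 0
--     for i in zero_idx:
--         trip = path_1d[start:i + 1]
--         if not (len(trip) == 2 and trip[0] == 0 and trip[1] == 0):
--             trips.append(trip)
--         start = i
--     pending = path_1d[start:]
--     if len(pending) > 1 and pending[-1] != 0:
--         trips.append(pending + [0])
--     return trips
-- ===== Notes on version B (the rewrite author's own statement) =====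
-- stated objective: alternative
-- what changed: A builds each trip element-by-element in one accumulator loop over enumerate; B first collects the depot-zero cut indices in a separate pass and then slices each trip directly out of the list, handling the unterminated tail slice separately.
import Mathlib
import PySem

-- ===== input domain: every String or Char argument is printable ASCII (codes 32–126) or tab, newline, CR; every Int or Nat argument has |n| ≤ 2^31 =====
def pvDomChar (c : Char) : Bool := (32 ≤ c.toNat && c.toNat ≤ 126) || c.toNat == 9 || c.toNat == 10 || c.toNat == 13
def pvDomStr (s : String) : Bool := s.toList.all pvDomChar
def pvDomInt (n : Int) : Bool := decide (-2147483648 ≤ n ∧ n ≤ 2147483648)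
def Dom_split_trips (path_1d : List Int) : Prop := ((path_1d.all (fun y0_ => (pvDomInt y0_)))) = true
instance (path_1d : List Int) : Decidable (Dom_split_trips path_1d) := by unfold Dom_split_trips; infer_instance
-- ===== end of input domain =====

-- B replaces A's single element-by-element accumulator loop with a two-pass decomposition
-- (first collect the depot-zero cut indices, then slice each trip out of the list); objective: alternative.

-- ===== PORT A =====
-- loop body of A: state = (trips, cur), item = (i, v) from enumerate
def stepA (st : List (List Int) × List Int) (iv : Int × Int) : List (List Int) × List Int :=
  if iv.1 = 0 then (st.1, [iv.2])
  else
    let cur := st.2 ++ [iv.2]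
    if iv.2 = 0 ∧ cur.length > 1 then
      (if ¬(cur.length = 2 ∧ PySem.List.pyGetD cur 0 0 = 0 ∧ PySem.List.pyGetD cur 1 0 = 0)
         then st.1 ++ [cur] else st.1, [0])
    else (st.1, cur)

def split_trips (path_1d : List Int) : List (List Int) :=
  let st := (PySem.List.enumerate path_1d).foldl stepA ([], [])
  if st.2.length > 1 ∧ PySem.List.pyGetD st.2 (-1) 0 ≠ 0 then st.1 ++ [st.2 ++ [0]]
  else st.1

-- ===== PORT B =====
-- loop body of B: state = (trips, start), item = one zero index i
def stepB (p : List Int) (st : List (List Int) × Int) (i : Int) : List (List Int) × Int :=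
  let trip := PySem.List.slice p (some st.2) (some (i + 1))
  (if ¬(trip.length = 2 ∧ PySem.List.pyGetD trip 0 0 = 0 ∧ PySem.List.pyGetD trip 1 0 = 0)
     then st.1 ++ [trip] else st.1, i)

def split_trips_alt (path_1d : List Int) : List (List Int) :=
  if path_1d = [] then []
  else
    let zero_idx := (PySem.List.pyRange 1 (PySem.List.len path_1d) 1).filter
      (fun i => PySem.List.pyGetD path_1d i 0 = 0)
    let st := zero_idx.foldl (stepB path_1d) ([], 0)
    let pending := PySem.List.slice path_1d (some st.2) none
    if pending.length > 1 ∧ PySem.List.pyGetD pending (-1) 0 ≠ 0 then st.1 ++ [pending ++ [0]]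
    else st.1

-- ===== PRECONDITION & SPEC =====
def Spec_split_trips (path_1d : List Int) (out : List (List Int)) : Prop := out = split_trips_alt path_1d
instance (path_1d : List Int) (out : List (List Int)) : Decidable (Spec_split_trips path_1d out) := by unfold Spec_split_trips; infer_instance

-- ===== CLAIM (what is proved, stated in full; the proofs are below) =====
def Claim_equal_split_trips : Prop := ∀ (path_1d : List Int), Dom_split_trips path_1d → Spec_split_trips path_1d (split_trips path_1d)

-- ===== LEMMAS AND PROOFS =====

lemma take_drop_ext (p : List Int) (s k : Nat) (hs : s ≤ k) (hk : k < p.length) :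
    (p.drop s).take (k - s) ++ [p.getD k 0] = (p.drop s).take (k + 1 - s) := by
  have h1 : k + 1 - s = (k - s) + 1 := by omega
  rw [h1, List.take_add_one]
  have h2 : (p.drop s)[k - s]? = p[k]? := by
    rw [List.getElem?_drop]; congr 1; omega
  have h3 : p[k]? = some (p.getD k 0) := by
    rw [List.getD_eq_getElem?_getD, List.getElem?_eq_getElem hk]; rfl
  rw [h2, h3]; rfl

lemma take_one_drop (p : List Int) (k : Nat) (hk : k < p.length) :
    (p.drop k).take 1 = [p.getD k 0] := by
  have := take_drop_ext p k k (le_refl k) hk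
  simpa using this.symm

lemma stepA_pos_nonzero (st : List (List Int) × List Int) (i v : Int) (hi : ¬ i = 0) (hv : ¬ v = 0) :
    stepA st (i, v) = (st.1, st.2 ++ [v]) := by
  simp [stepA, hi, hv]

lemma stepA_pos_zero (st : List (List Int) × List Int) (i : Int) (hi : ¬ i = 0)
    (hlen : (st.2 ++ [(0:Int)]).length > 1) :
    stepA st (i, 0) = (if ¬((st.2 ++ [(0:Int)]).length = 2 ∧ PySem.List.pyGetD (st.2 ++ [(0:Int)]) 0 0 = 0 ∧ PySem.List.pyGetD (st.2 ++ [(0:Int)]) 1 0 = 0)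
       then st.1 ++ [st.2 ++ [(0:Int)]] else st.1, [0]) := by
  simp only [stepA]
  rw [if_neg hi]
  rw [if_pos ⟨trivial, hlen⟩]

lemma stepB_eq (p : List Int) (st : List (List Int) × Int) (i : Int) :
    stepB p st i = (if ¬((PySem.List.slice p (some st.2) (some (i+1))).length = 2 ∧ PySem.List.pyGetD (PySem.List.slice p (some st.2) (some (i+1))) 0 0 = 0 ∧ PySem.List.pyGetD (PySem.List.slice p (some st.2) (some (i+1))) 1 0 = 0)
       then st.1 ++ [PySem.List.slice p (some st.2) (some (i+1))] else st.1, i) := rfl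

lemma inv (p : List Int) (m : Nat) (hm : m + 1 ≤ p.length) :
    ∃ s : Nat,
      (((List.range m).map (fun (j : Nat) => ((j : Int) + 1, p.getD (j + 1) 0))).foldl stepA ([], [p.getD 0 0])).1
        = (((PySem.List.pyRange 1 ((m : Int) + 1) 1).filter (fun i => PySem.List.pyGetD p i 0 = 0)).foldl (stepB p) ([], 0)).1
      ∧ (((PySem.List.pyRange 1 ((m : Int) + 1) 1).filter (fun i => PySem.List.pyGetD p i 0 = 0)).foldl (stepB p) ([], 0)).2 = (s : Int)
      ∧ s ≤ m
      ∧ (((List.range m).map (fun (j : Nat) => ((j : Int) + 1, p.getD (j + 1) 0))).foldl stepA ([], [p.getD 0 0])).2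
          = (p.drop s).take (m + 1 - s) := by
  induction m with
  | zero =>
    have h0 : ((0:Nat) : Int) + 1 = 1 := by norm_num
    rw [h0, PySem.List.pyRange_one_eq_nil le_rfl]
    refine ⟨0, by simp, by simp, le_refl 0, ?_⟩
    simpa using take_one_drop p 0 (by omega) |>.symm
  | succ m ih =>
    obtain ⟨s, h1, h2, h3, h4⟩ := ih (by omega)
    have hmlt : m + 1 < p.length := by omega
    rw [List.range_succ, List.map_append, List.foldl_append]
    have hr : PySem.List.pyRange 1 (((m+1:Nat) : Int) + 1) 1
        = PySem.List.pyRange 1 ((m : Int) + 1) 1 ++ [(m : Int) + 1] := by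
      have h : ((m+1:Nat) : Int) + 1 = ((m : Int) + 1) + 1 := by push_cast; ring
      rw [h, PySem.List.pyRange_one_succ_right (by omega)]
    rw [hr, List.filter_append, List.foldl_append]
    have hcast : ((m : Int) + 1) = ((m + 1 : Nat) : Int) := by push_cast; ring
    have hget : PySem.List.pyGetD p ((m : Int) + 1) 0 = p.getD (m+1) 0 := by
      rw [hcast, PySem.List.pyGetD_natCast]
    set Aold := ((List.range m).map (fun (j : Nat) => ((j : Int) + 1, p.getD (j + 1) 0))).foldl stepA ([], [p.getD 0 0]) with hA
    set Bold := ((PySem.List.pyRange 1 ((m : Int) + 1) 1).filter (fun i => PySem.List.pyGetD p i 0 = 0)).foldl (stepB p) ([], 0) with hB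
    have hne : ¬ ((m : Int) + 1 = 0) := by omega
    by_cases hv : p.getD (m+1) 0 = 0
    · -- a cut point at index m+1
      have hfil : List.filter (fun i => decide (PySem.List.pyGetD p i 0 = 0)) [(m : Int) + 1]
          = [(m : Int) + 1] := by
        rw [List.filter_cons, List.filter_nil, hget, hv]
        simp
      rw [hfil]
      have htrip : PySem.List.slice p (some Bold.2) (some (((m : Int) + 1) + 1))
          = (p.drop s).take (m + 1 + 1 - s) := by
        rw [h2]
        have h : ((m : Int) + 1) + 1 = ((m + 1 + 1 : Nat) : Int) := by push_cast; ring
        rw [h, PySem.List.slice_natCast]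
      have hcur : Aold.2 ++ [(0:Int)] = (p.drop s).take (m + 1 + 1 - s) := by
        rw [h4]
        have h := take_drop_ext p s (m+1) (by omega) hmlt
        rw [hv] at h
        exact h
      have hcurlen : (Aold.2 ++ [(0:Int)]).length > 1 := by
        rw [hcur, List.length_take, List.length_drop]; omega
      simp only [List.map_cons, List.map_nil, List.foldl_cons, List.foldl_nil]
      have hAstep : stepA Aold ((m : Int) + 1, p.getD (m+1) 0)
          = (if ¬((Aold.2 ++ [(0:Int)]).length = 2 ∧ PySem.List.pyGetD (Aold.2 ++ [(0:Int)]) 0 0 = 0 ∧ PySem.List.pyGetD (Aold.2 ++ [(0:Int)]) 1 0 = 0)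
               then Aold.1 ++ [Aold.2 ++ [(0:Int)]] else Aold.1, [0]) := by
        rw [hv]; exact stepA_pos_zero Aold _ hne hcurlen
      rw [hAstep, stepB_eq, htrip, ← hcur, h1]
      refine ⟨m + 1, rfl, ?_, le_refl _, ?_⟩
      · simp only
        push_cast; ring
      · simp only
        rw [show m + 1 + 1 - (m + 1) = 1 by omega, take_one_drop p (m+1) hmlt, hv]
    · -- no cut at index m+1
      have hfil : List.filter (fun i => decide (PySem.List.pyGetD p i 0 = 0)) [(m : Int) + 1]
          = [] := by
        rw [List.filter_cons, List.filter_nil, hget]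
        simp only [hv]
        simp
      rw [hfil]
      simp only [List.map_cons, List.map_nil, List.foldl_cons, List.foldl_nil]
      rw [stepA_pos_nonzero Aold _ _ hne hv]
      refine ⟨s, h1, h2, by omega, ?_⟩
      simp only
      rw [h4]
      exact take_drop_ext p s (m+1) (by omega) hmlt

lemma enum_eq (xs : List Int) (s : Nat) :
    PySem.List.enumerate xs (s : Int)
      = (List.range xs.length).map (fun j => (((s + j : Nat) : Int), xs.getD j 0)) := by
  induction xs generalizing s with
  | nil => simp [PySem.List.enumerate_nil]
  | cons x xs ih =>
    rw [PySem.List.enumerate_cons]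
    have h : ((s:Int) + 1) = ((s+1 : Nat) : Int) := by push_cast; ring
    rw [h, ih (s+1)]
    simp [List.range_succ_eq_map, List.map_map, Function.comp]
    intro a _; ring

lemma split_trips_eq_alt : ∀ (p : List Int), split_trips p = split_trips_alt p := by
  intro p
  match hp : p with
  | [] => rfl
  | x :: xs =>
    set m := xs.length with hmdef
    have hlen : (x :: xs).length = m + 1 := rfl
    have hne : (x :: xs) ≠ [] := by simp
    -- rewrite A's enumerate fold into the range-map fold of `inv`
    have henum : PySem.List.enumerate (x :: xs) (0:Int)
        = ((0:Int), (x::xs).getD 0 0) :: (List.range m).map (fun (j : Nat) => ((j : Int) + 1, (x::xs).getD (j + 1) 0)) := by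
      have h0 : ((0:Nat) : Int) = (0 : Int) := by norm_num
      rw [← h0, enum_eq (x :: xs) 0, hlen, List.range_succ_eq_map, List.map_cons, List.map_map]
      congr 1
      apply List.map_congr_left
      intro j hj
      simp [Function.comp]
    obtain ⟨s, h1, h2, h3, h4⟩ := inv (x :: xs) m (le_of_eq hlen.symm)
    have hfoldA : (PySem.List.enumerate (x :: xs)).foldl stepA ([], [])
        = ((List.range m).map (fun (j : Nat) => ((j : Int) + 1, (x :: xs).getD (j + 1) 0))).foldl stepA ([], [(x :: xs).getD 0 0]) := by
      rw [show PySem.List.enumerate (x :: xs) = PySem.List.enumerate (x :: xs) (0:Int) from rfl, henum, List.foldl_cons]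
      congr 1
    have hlenp : PySem.List.len (x :: xs) = ((m : Int) + 1) := by
      simp [hlen]
    have hA2 : (((List.range m).map (fun (j : Nat) => ((j : Int) + 1, (x :: xs).getD (j + 1) 0))).foldl stepA ([], [(x :: xs).getD 0 0])).2
        = List.drop s (x :: xs) := by
      rw [h4, List.take_of_length_le]
      rw [List.length_drop, hlen]
    have hpend : PySem.List.slice (x :: xs) (some ((s : Nat) : Int)) none = List.drop s (x :: xs) :=
      PySem.List.slice_from_natCast (x :: xs) s
    simp only [split_trips, split_trips_alt, if_neg hne]
    rw [hfoldA, hlenp, h2, hpend, hA2, h1]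

-- ===== VERDICT (by name: the statement is the Claim_ definition above) =====
theorem split_trips_spec : Claim_equal_split_trips := by
  intro p _
  unfold Spec_split_trips
  exact split_trips_eq_alt p
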